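-- pv_equiv track=rewrite | github.com/jonathan-aulson/autodocx | autodocx/render/mkdocs.py | _relationship_matrix_table
-- ===== SOURCE A (Python) =====
-- from collections import defaultdict
-- from typing import Any, Dict, List, Sequence, Iterable, Tuple, Set
--
-- def _relationship_matrix_table(rels: List[Dict[str, Any]]) -> str:
--     if not rels:
--         return ""
--     matrix = defaultdict(lambda: defaultdict(int))
--     for rel in rels:
--         kind = ((rel.get("target") or {}).get("kind") or "unknown").lower()
--         op = ((rel.get("operation") or {}).get("type") or "touches").lower()
--         matrix[kind][op] += 1
--     rows = ["| Target Kind | Operation | Count |", "|-------------|-----------|-------|"]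
--     for kind in sorted(matrix.keys()):
--         for op in sorted(matrix[kind].keys()):
--             rows.append(f"| {kind} | {op} | {matrix[kind][op]} |")
--     return "\n".join(rows)
-- ===== SOURCE B (Python) =====
-- def _relationship_matrix_table(rels):
--     if not rels:
--         return ""
--     pairs = sorted(
--         (((rel.get("target") or {}).get("kind") or "unknown").lower(),
--          ((rel.get("operation") or {}).get("type") or "touches").lower())
--         for rel in rels
--     )
--     rows = ["| Target Kind | Operation | Count |", "|-------------|-----------|-------|"]
--     i, n = 0, len(pairs)
--     while i < n:
--         j = i
--         while j < n and pairs[j] == pairs[i]: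
--             j += 1
--         kind, op = pairs[i]
--         rows.append(f"| {kind} | {op} | {j - i} |")
--         i = j
--     return "\n".join(rows)
-- ===== Notes on version B (the rewrite author's own statement) =====
-- stated objective: alternative
-- what changed: Replaces A's nested defaultdict-of-counters plus two nested sorted() emission loops by computing the flat list of (kind, op) pairs, sorting it once, and emitting one row per run of equal pairs via a single run-length grouping pass (no dictionaries at all).
import Mathlib
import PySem

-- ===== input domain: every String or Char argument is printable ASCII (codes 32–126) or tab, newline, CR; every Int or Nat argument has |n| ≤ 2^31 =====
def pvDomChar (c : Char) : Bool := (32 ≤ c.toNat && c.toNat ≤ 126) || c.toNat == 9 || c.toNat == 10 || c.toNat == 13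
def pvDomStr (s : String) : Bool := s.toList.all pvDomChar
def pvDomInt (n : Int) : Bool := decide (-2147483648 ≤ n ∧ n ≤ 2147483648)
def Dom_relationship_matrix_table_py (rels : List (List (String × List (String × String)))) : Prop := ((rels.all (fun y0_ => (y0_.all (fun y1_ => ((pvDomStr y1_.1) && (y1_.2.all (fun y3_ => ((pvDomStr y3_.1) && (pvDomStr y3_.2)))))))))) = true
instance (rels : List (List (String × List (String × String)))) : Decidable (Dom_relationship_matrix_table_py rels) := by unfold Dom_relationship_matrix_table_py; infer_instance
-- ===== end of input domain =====

-- B replaces A's nested dict-of-counters + two nested sorts by one sort of the (kind, op) pair list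
-- followed by a single run-length grouping pass (objective: alternative algorithm, no dicts).


-- helpers shared by BOTH ports (the corresponding Python expressions are identical in A and B):
-- per-rel extraction `((rel.get("target") or {}).get("kind") or "unknown").lower()` (and the op twin)
def pvRelKindOp (rel : List (String × List (String × String))) : String × String :=
  let tgt := match (PySem.Dict.mk rel).get? "target" with
    | some d => d
    | none => []
  let kind := PySem.Str.lower (match (PySem.Dict.mk tgt).get? "kind" with
    | some s => if s = "" then "unknown" else s
    | none => "unknown")
  let opd := match (PySem.Dict.mk rel).get? "operation" with
    | some d => d
    | none => []
  let op := PySem.Str.lower (match (PySem.Dict.mk opd).get? "type" with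
    | some s => if s = "" then "touches" else s
    | none => "touches")
  (kind, op)

-- the row f-string  f"| {kind} | {op} | {n} |"  (identical in both Pythons)
def pvRow (kind op : String) (n : Int) : String :=
  "| " ++ kind ++ " | " ++ op ++ " | " ++ PySem.Int.toStr n ++ " |"

-- ===== PORT A =====
def relationship_matrix_table_py (rels : List (List (String × List (String × String)))) : String :=
  if rels = [] then ""
  else
    let matrix : PySem.Dict String (PySem.Dict String Int) :=
      rels.foldl (fun m rel =>
        let ko := pvRelKindOp rel
        m.insert ko.1 ((m.getD ko.1 PySem.Dict.empty).modify ko.2 0 (· + 1)))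
        PySem.Dict.empty
    let rows : List String := ["| Target Kind | Operation | Count |", "|-------------|-----------|-------|"]
    let rows := (PySem.List.sorted matrix.keys (fun x => x) false).foldl
      (fun rows kind =>
        (PySem.List.sorted ((matrix.getD kind PySem.Dict.empty).keys) (fun x => x) false).foldl
          (fun rows op => rows ++ [pvRow kind op ((matrix.getD kind PySem.Dict.empty).getD op 0)])
          rows)
      rows
    PySem.Str.join "\n" rows

-- ===== PORT B =====
-- the `while i < n` grouping loop of Source B, as the obvious structural recursion on the sorted list:
-- one output row per run of equal (kind, op) pairs, row count = run length
def pvRuns : List (String × String) → List String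
  | [] => []
  | p :: rest =>
    pvRow p.1 p.2 (((rest.takeWhile (fun q => q == p)).length : Int) + 1)
      :: pvRuns (rest.drop (rest.takeWhile (fun q => q == p)).length)
  termination_by l => l.length
  decreasing_by simp

def relationship_matrix_table_py_alt (rels : List (List (String × List (String × String)))) : String :=
  if rels = [] then ""
  else
    let pairs := PySem.List.sorted2 (rels.map pvRelKindOp) Prod.fst Prod.snd false
    PySem.Str.join "\n"
      (["| Target Kind | Operation | Count |", "|-------------|-----------|-------|"] ++ pvRuns pairs)

-- ===== PRECONDITION & SPEC =====
def Spec_relationship_matrix_table_py (rels : List (List (String × List (String × String)))) (out : String) : Prop := out = relationship_matrix_table_py_alt rels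
instance (rels : List (List (String × List (String × String)))) (out : String) : Decidable (Spec_relationship_matrix_table_py rels out) := by unfold Spec_relationship_matrix_table_py; infer_instance

-- ===== CLAIM (what is proved, stated in full; the proofs are below) =====
def Claim_equal_relationship_matrix_table_py : Prop := ∀ (rels : List (List (String × List (String × String)))), Dom_relationship_matrix_table_py rels → Spec_relationship_matrix_table_py rels (relationship_matrix_table_py rels)

-- ===== LEMMAS AND PROOFS =====

-- the lexicographic order Python uses on (kind, op) tuples
def pvLt (a b : String × String) : Prop := toLex a < toLex b
def pvLe (a b : String × String) : Prop := toLex a ≤ toLex b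

-- one aggregation step of A's loop body (value view of `matrix[kind][op] += 1`)
def pvStep (m : PySem.Dict String (PySem.Dict String Int)) (p : String × String) :
    PySem.Dict String (PySem.Dict String Int) :=
  m.insert p.1 ((m.getD p.1 PySem.Dict.empty).modify p.2 0 (· + 1))

-- the first element of each run of pvRuns
def pvHeads : List (String × String) → List (String × String)
  | [] => []
  | p :: rest => p :: pvHeads (rest.drop (rest.takeWhile (fun q => q == p)).length)
  termination_by l => l.length
  decreasing_by simp

lemma pv_M1 (ps : List (String × String)) (m : PySem.Dict String (PySem.Dict String Int))
    (k o : String) :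
    ((ps.foldl pvStep m).getD k PySem.Dict.empty).getD o 0
      = (m.getD k PySem.Dict.empty).getD o 0 + (ps.count (k, o) : Int) := by
  induction ps generalizing m with
  | nil => simp
  | cons p ps ih =>
    rw [List.foldl_cons, ih, List.count_cons]
    by_cases hk : k = p.1
    · subst hk
      rw [show pvStep m p = m.insert p.1 ((m.getD p.1 PySem.Dict.empty).modify p.2 0 (· + 1)) from rfl,
          PySem.Dict.getD_insert_self]
      by_cases ho : o = p.2
      · subst ho
        rw [PySem.Dict.getD_modify_self]
        have hb : (p == ((p.1 : String), p.2)) = true := beq_iff_eq.mpr rfl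
        simp only [hb, if_true]
        push_cast
        ring
      · rw [PySem.Dict.getD_modify_of_ne _ _ _ ho]
        have hb : (p == ((p.1 : String), o)) = false := by
          apply beq_eq_false_iff_ne.mpr
          intro h
          exact ho (congrArg Prod.snd h).symm
        simp [hb]
    · rw [show pvStep m p = m.insert p.1 ((m.getD p.1 PySem.Dict.empty).modify p.2 0 (· + 1)) from rfl,
          PySem.Dict.getD_insert_of_ne _ _ _ hk]
      have hb : (p == ((k : String), o)) = false := by
        apply beq_eq_false_iff_ne.mpr
        intro h
        exact hk (congrArg Prod.fst h).symm
      simp [hb]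

lemma pv_M2 (ps : List (String × String)) (m : PySem.Dict String (PySem.Dict String Int))
    (k o : String) :
    o ∈ ((ps.foldl pvStep m).getD k PySem.Dict.empty).keys
      ↔ o ∈ (m.getD k PySem.Dict.empty).keys ∨ (k, o) ∈ ps := by
  induction ps generalizing m with
  | nil => simp
  | cons p ps ih =>
    rw [List.foldl_cons, ih, List.mem_cons]
    by_cases hk : k = p.1
    · subst hk
      rw [show pvStep m p = m.insert p.1 ((m.getD p.1 PySem.Dict.empty).modify p.2 0 (· + 1)) from rfl,
          PySem.Dict.getD_insert_self, PySem.Dict.keys_modify]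
      rw [show ((p.1, o) = p) ↔ (o = p.2) from by
        constructor
        · intro h; exact (congrArg Prod.snd h)
        · intro h; exact Prod.ext rfl h]
      simp only [PySem.Dict.mem_keys_insert]
      tauto
    · rw [show pvStep m p = m.insert p.1 ((m.getD p.1 PySem.Dict.empty).modify p.2 0 (· + 1)) from rfl,
          PySem.Dict.getD_insert_of_ne _ _ _ hk]
      constructor
      · rintro (h | h)
        · exact Or.inl h
        · exact Or.inr (Or.inr h)
      · rintro (h | h | h)
        · exact Or.inl h
        · exact absurd (show k = p.1 from congrArg Prod.fst h) hk
        · exact Or.inr h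

lemma pv_M3 (ps : List (String × String)) (m : PySem.Dict String (PySem.Dict String Int))
    (k : String) (h : (m.getD k PySem.Dict.empty).keys.Nodup) :
    ((ps.foldl pvStep m).getD k PySem.Dict.empty).keys.Nodup := by
  induction ps generalizing m with
  | nil => exact h
  | cons p ps ih =>
    rw [List.foldl_cons]
    apply ih
    by_cases hk : k = p.1
    · subst hk
      rw [show pvStep m p = m.insert p.1 ((m.getD p.1 PySem.Dict.empty).modify p.2 0 (· + 1)) from rfl,
          PySem.Dict.getD_insert_self, PySem.Dict.keys_modify]
      exact PySem.Dict.nodup_keys_insert _ _ _ h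
    · rwa [show pvStep m p = m.insert p.1 ((m.getD p.1 PySem.Dict.empty).modify p.2 0 (· + 1)) from rfl,
          PySem.Dict.getD_insert_of_ne _ _ _ hk]

lemma pv_step_eq : pvStep = fun (d : PySem.Dict String (PySem.Dict String Int)) (x : String × String) =>
    d.insert (Prod.fst x) ((d.getD x.1 PySem.Dict.empty).modify x.2 0 (· + 1)) := rfl

lemma pv_M4 (ps : List (String × String)) (k : String) :
    k ∈ (ps.foldl pvStep PySem.Dict.empty).keys ↔ k ∈ ps.map Prod.fst := by
  rw [pv_step_eq, PySem.Dict.keys_foldl_insert_key ps Prod.fst _ PySem.Dict.empty]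
  rw [PySem.Set.mem_update]
  simp [PySem.Dict.keys_empty]

lemma pv_M5 (ps : List (String × String)) : (ps.foldl pvStep PySem.Dict.empty).keys.Nodup := by
  rw [pv_step_eq]
  apply PySem.Dict.nodup_keys_foldl_insert_key
  simp [PySem.Dict.keys_empty]

lemma pv_sorted_lt (xs : List String) (h : xs.Nodup) :
    (PySem.List.sorted xs (fun x => x) false).Pairwise (· < ·) := by
  have h1 := PySem.List.sorted_pairwise xs (fun x => x)
  have h2 : (PySem.List.sorted xs (fun x => x) false).Nodup :=
    ((PySem.List.sorted_perm xs (fun x => x) false).nodup_iff).mpr h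
  exact (h1.and h2).imp (fun hab => lt_of_le_of_ne hab.1 hab.2)

lemma pv_sorted2_le (ps : List (String × String)) :
    (PySem.List.sorted2 ps Prod.fst Prod.snd false).Pairwise pvLe := by
  have hB : (fun (a b : String × String) =>
        decide (a.1 < b.1) || !decide (b.1 < a.1) && decide (a.2 < b.2))
      = fun a b => decide ((fun q : String × String => toLex q) a < (fun q : String × String => toLex q) b) := by
    funext a b
    rcases lt_trichotomy a.1 b.1 with h | h | h
    · simp [Prod.Lex.lt_iff, h, asymm h]
    · simp [Prod.Lex.lt_iff, h]
    · simp [Prod.Lex.lt_iff, h, asymm h, h.ne']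
  have hfold : ∀ (xs acc : List (String × String)),
      acc.Pairwise (fun a b => (fun q : String × String => toLex q) a ≤ (fun q : String × String => toLex q) b) →
      (List.foldl (fun acc x => PySem.List.insertBy
          (fun a b => decide ((fun q : String × String => toLex q) a < (fun q : String × String => toLex q) b)) x acc)
        acc xs).Pairwise (fun a b => (fun q : String × String => toLex q) a ≤ (fun q : String × String => toLex q) b) := by
    intro xs
    induction xs with
    | nil => intro acc h; exact h
    | cons x xs ih =>
      intro acc h
      exact ih _ (PySem.List.insertBy_pairwise_le _ x acc h)
  rw [show PySem.List.sorted2 ps Prod.fst Prod.snd false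
      = List.foldl (fun acc x => PySem.List.insertBy
          (fun (a b : String × String) =>
            decide (a.1 < b.1) || !decide (b.1 < a.1) && decide (a.2 < b.2)) x acc) [] ps from rfl,
    hB]
  exact hfold ps [] List.Pairwise.nil

lemma pv_heads_subset (S : List (String × String)) : ∀ q ∈ pvHeads S, q ∈ S := by
  induction S using pvHeads.induct with
  | case1 => intro q h; simp [pvHeads] at h
  | case2 p rest ih =>
    intro q h
    rw [pvHeads] at h
    rcases List.mem_cons.mp h with h | h
    · exact h ▸ List.mem_cons_self
    · exact List.mem_cons_of_mem _ (List.drop_subset _ _ (ih q h))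

lemma pv_drop_takeWhile {α : Type} (l : List α) (p : α → Bool) :
    l.drop (l.takeWhile p).length = l.dropWhile p := by
  induction l with
  | nil => rfl
  | cons x xs ih =>
    by_cases h : p x
    · simpa [h] using ih
    · simp [h]

lemma pv_run_facts (p : String × String) (rest : List (String × String))
    (h : (p :: rest).Pairwise pvLe) :
    (∀ q ∈ rest.takeWhile (fun q => q == p), q = p) ∧
    p ∉ rest.drop (rest.takeWhile (fun q => q == p)).length ∧
    (rest.drop (rest.takeWhile (fun q => q == p)).length).Pairwise pvLe ∧
    (∀ q ∈ rest.drop (rest.takeWhile (fun q => q == p)).length, pvLe p q) := by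
  have hT : ∀ q ∈ rest.takeWhile (fun q => q == p), q = p := by
    intro q hq
    exact beq_iff_eq.mp (List.mem_takeWhile_imp (p := fun q => q == p) (l := rest) hq)
  rw [pv_drop_takeWhile]
  have hrest : rest.Pairwise pvLe := h.of_cons
  have hsplit : rest.takeWhile (fun q => q == p) ++ rest.dropWhile (fun q => q == p) = rest :=
    List.takeWhile_append_dropWhile
  have hd : (rest.dropWhile (fun q => q == p)).Pairwise pvLe := by
    have := hsplit ▸ hrest
    exact (List.pairwise_append.mp this).2.1
  have hle : ∀ q ∈ rest.dropWhile (fun q => q == p), pvLe p q := by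
    intro q hq
    apply List.rel_of_pairwise_cons h
    rw [← hsplit]
    exact List.mem_append_right _ hq
  refine ⟨hT, ?_, hd, hle⟩
  intro hp
  cases hdw : rest.dropWhile (fun q => q == p) with
  | nil => rw [hdw] at hp; exact absurd hp (List.not_mem_nil)
  | cons q d' =>
    have hqp : (q == p) = false := by
      have := List.head?_dropWhile_not (fun q => q == p) rest
      rw [hdw] at this
      exact this
    have hqp' : q ≠ p := by simpa using hqp
    rw [hdw] at hp
    rcases List.mem_cons.mp hp with h1 | h1
    · exact hqp' h1.symm
    · have h2 : pvLe q p := by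
        rw [hdw] at hd
        exact List.rel_of_pairwise_cons hd h1
      have h3 : pvLe p q := hle q (hdw ▸ List.mem_cons_self)
      exact hqp' (toLex_inj.mp (le_antisymm h2 h3))

lemma pv_B2 (S : List (String × String)) (h : S.Pairwise pvLe) : (pvHeads S).Pairwise pvLt := by
  induction S using pvHeads.induct with
  | case1 => simp [pvHeads]
  | case2 p rest ih =>
    obtain ⟨hT, hpd, hd, hle⟩ := pv_run_facts p rest h
    rw [pvHeads]
    refine List.Pairwise.cons ?_ (ih hd)
    intro q hq
    have hqd := pv_heads_subset _ q hq
    have h1 : pvLe p q := hle q hqd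
    have h2 : q ≠ p := fun he => hpd (he ▸ hqd)
    exact lt_of_le_of_ne h1 (fun he => h2 (toLex_inj.mp he).symm)

lemma pv_B3 (S : List (String × String)) (h : S.Pairwise pvLe) (q : String × String) :
    q ∈ pvHeads S ↔ q ∈ S := by
  induction S using pvHeads.induct with
  | case1 => simp [pvHeads]
  | case2 p rest ih =>
    obtain ⟨hT, hpd, hd, hle⟩ := pv_run_facts p rest h
    rw [pvHeads]
    constructor
    · intro hq
      rcases List.mem_cons.mp hq with h1 | h1
      · exact h1 ▸ List.mem_cons_self
      · exact List.mem_cons_of_mem _ (List.drop_subset _ _ (pv_heads_subset _ q h1))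
    · intro hq
      rcases List.mem_cons.mp hq with h1 | h1
      · exact h1 ▸ List.mem_cons_self
      · rw [← List.takeWhile_append_dropWhile (p := fun q => q == p) (l := rest)] at h1
        rcases List.mem_append.mp h1 with h2 | h2
        · exact (hT q h2) ▸ List.mem_cons_self
        · apply List.mem_cons_of_mem
          apply (ih hd).mpr
          rwa [pv_drop_takeWhile]

lemma pv_B1 (S : List (String × String)) (h : S.Pairwise pvLe) :
    pvRuns S = (pvHeads S).map (fun q => pvRow q.1 q.2 (S.count q)) := by
  induction S using pvHeads.induct with
  | case1 => simp [pvHeads, pvRuns]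
  | case2 p rest ih =>
    obtain ⟨hT, hpd, hd, hle⟩ := pv_run_facts p rest h
    rw [pvRuns, pvHeads, List.map_cons, ih hd]
    have hsplit : rest.takeWhile (fun q => q == p) ++ rest.dropWhile (fun q => q == p) = rest :=
      List.takeWhile_append_dropWhile
    have hcount : ((p :: rest).count p : Int)
        = ((rest.takeWhile (fun q => q == p)).length : Int) + 1 := by
      have h1 : (rest.takeWhile (fun q => q == p)).count p
          = (rest.takeWhile (fun q => q == p)).length :=
        List.count_eq_length.mpr (fun b hb => (hT b hb).symm)
      have h2 : (rest.dropWhile (fun q => q == p)).count p = 0 := by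
        rw [List.count_eq_zero]
        rwa [pv_drop_takeWhile] at hpd
      rw [List.count_cons, ← hsplit, List.count_append, h1, h2]
      simp
    congr 1
    · rw [hcount]
    · apply List.map_congr_left
      intro q hq
      have hqd := pv_heads_subset _ q hq
      have hqp : q ≠ p := fun he => hpd (he ▸ hqd)
      congr 1
      have hqrest : (rest.takeWhile (fun q => q == p)).count q = 0 := by
        rw [List.count_eq_zero]
        intro hmem
        exact hqp (hT q hmem)
      rw [List.count_cons, ← hsplit, List.count_append, hqrest, pv_drop_takeWhile]
      have hpq : (p == q) = false := by
        apply beq_eq_false_iff_ne.mpr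
        exact fun he => hqp he.symm
      simp [hpq]

lemma pv_A1 (ks : List String) (f : String → List String) (hks : ks.Pairwise (· < ·))
    (hf : ∀ k, (f k).Pairwise (· < ·)) :
    (ks.flatMap (fun k => (f k).map (fun o => (k, o)))).Pairwise pvLt := by
  induction ks with
  | nil => simp
  | cons k ks ih =>
    rw [List.flatMap_cons, List.pairwise_append]
    refine ⟨?_, ih hks.of_cons, ?_⟩
    · rw [List.pairwise_map]
      exact (hf k).imp (fun hab => by
        rw [pvLt, Prod.Lex.lt_iff]
        exact Or.inr ⟨rfl, hab⟩)
    · intro a ha b hb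
      obtain ⟨o, _, rfl⟩ := List.mem_map.mp ha
      obtain ⟨k', hk', hb'⟩ := List.mem_flatMap.mp hb
      obtain ⟨o', _, rfl⟩ := List.mem_map.mp hb'
      rw [pvLt, Prod.Lex.lt_iff]
      exact Or.inl (List.rel_of_pairwise_cons hks hk')

lemma pv_A2 (ks : List String) (f : String → List String) (z : String × String) :
    z ∈ ks.flatMap (fun k => (f k).map (fun o => (k, o))) ↔ z.1 ∈ ks ∧ z.2 ∈ f z.1 := by
  rw [List.mem_flatMap]
  constructor
  · rintro ⟨k, hk, hz⟩
    obtain ⟨o, ho, rfl⟩ := List.mem_map.mp hz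
    exact ⟨hk, ho⟩
  · rintro ⟨h1, h2⟩
    exact ⟨z.1, h1, List.mem_map.mpr ⟨z.2, h2, rfl⟩⟩

lemma pv_unique (xs ys : List (String × String)) (hx : xs.Pairwise pvLt) (hy : ys.Pairwise pvLt)
    (hm : ∀ q, q ∈ xs ↔ q ∈ ys) : xs = ys := by
  have hne : ∀ (l : List (String × String)), l.Pairwise pvLt → l.Nodup := fun l hl =>
    hl.imp (fun hab he => absurd (he ▸ hab) (by rw [pvLt]; exact lt_irrefl _))
  apply List.Perm.eq_of_pairwise (le := pvLt) ?_ hx hy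
  · exact (List.perm_ext_iff_of_nodup (hne xs hx) (hne ys hy)).mpr hm
  · intro a b _ _ h1 h2
    exact absurd h2 (not_lt_of_gt h1)

lemma pv_main (rels : List (List (String × List (String × String)))) :
    relationship_matrix_table_py rels = relationship_matrix_table_py_alt rels := by
  by_cases h0 : rels = []
  · simp [relationship_matrix_table_py, relationship_matrix_table_py_alt, h0]
  · have hS := pv_sorted2_le (rels.map pvRelKindOp)
    -- A side reduction to a flatMap over the sorted nested keys
    have hA : relationship_matrix_table_py rels
        = PySem.Str.join "\n"
          (["| Target Kind | Operation | Count |", "|-------------|-----------|-------|"]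
            ++ (PySem.List.sorted ((rels.map pvRelKindOp).foldl pvStep PySem.Dict.empty).keys (fun x => x) false).flatMap
              (fun kind => (PySem.List.sorted (((rels.map pvRelKindOp).foldl pvStep PySem.Dict.empty).getD kind PySem.Dict.empty).keys (fun x => x) false).map
                (fun op => pvRow kind op ((((rels.map pvRelKindOp).foldl pvStep PySem.Dict.empty).getD kind PySem.Dict.empty).getD op 0)))) := by
      simp only [relationship_matrix_table_py, if_neg h0,
        PySem.List.foldl_append_singleton_eq_map, PySem.List.foldl_append_eq_flatMap]
      rw [List.foldl_map]
      rfl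
    -- B side reduction
    have hB : relationship_matrix_table_py_alt rels
        = PySem.Str.join "\n"
          (["| Target Kind | Operation | Count |", "|-------------|-----------|-------|"]
            ++ pvRuns (PySem.List.sorted2 (rels.map pvRelKindOp) Prod.fst Prod.snd false)) := by
      simp only [relationship_matrix_table_py_alt, if_neg h0]
    rw [hA, hB]
    congr 1
    congr 1
    have hcnt : ∀ k o, (((rels.map pvRelKindOp).foldl pvStep PySem.Dict.empty).getD k PySem.Dict.empty).getD o 0
        = ((rels.map pvRelKindOp).count (k, o) : Int) := by
      intro k o
      rw [pv_M1]
      simp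
    have hkeysnodup : ((rels.map pvRelKindOp).foldl pvStep PySem.Dict.empty).keys.Nodup :=
      pv_M5 (rels.map pvRelKindOp)
    have hinnernodup : ∀ k, (((rels.map pvRelKindOp).foldl pvStep PySem.Dict.empty).getD k PySem.Dict.empty).keys.Nodup := by
      intro k
      apply pv_M3
      simp [PySem.Dict.keys_empty]
    -- A's (kind, op) pair list equals the run heads of B's sorted pair list
    have hLA : (PySem.List.sorted ((rels.map pvRelKindOp).foldl pvStep PySem.Dict.empty).keys (fun x => x) false).flatMap
          (fun k => (PySem.List.sorted (((rels.map pvRelKindOp).foldl pvStep PySem.Dict.empty).getD k PySem.Dict.empty).keys (fun x => x) false).map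
            (fun o => (k, o)))
        = pvHeads (PySem.List.sorted2 (rels.map pvRelKindOp) Prod.fst Prod.snd false) := by
      apply pv_unique
      · exact pv_A1 _ _ (pv_sorted_lt _ hkeysnodup) (fun k => pv_sorted_lt _ (hinnernodup k))
      · exact pv_B2 _ hS
      · intro q
        rw [pv_A2, pv_B3 _ hS]
        rw [PySem.List.mem_sorted, PySem.List.mem_sorted]
        rw [pv_M4, pv_M2]
        simp only [PySem.Dict.getD_empty, PySem.Dict.keys_empty, List.not_mem_nil, false_or]
        constructor
        · rintro ⟨_, h2⟩
          exact ((PySem.List.sorted2_perm (rels.map pvRelKindOp) Prod.fst Prod.snd false).mem_iff).mpr h2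
        · intro hq
          have hq' : q ∈ rels.map pvRelKindOp :=
            ((PySem.List.sorted2_perm (rels.map pvRelKindOp) Prod.fst Prod.snd false).mem_iff).mp hq
          exact ⟨List.mem_map.mpr ⟨q, hq', rfl⟩, by rwa [Prod.mk.eta]⟩
    have hcount2 : ∀ q : String × String,
        (PySem.List.sorted2 (rels.map pvRelKindOp) Prod.fst Prod.snd false).count q
          = (rels.map pvRelKindOp).count q :=
      (PySem.List.sorted2_perm (rels.map pvRelKindOp) Prod.fst Prod.snd false).count_eq
    rw [pv_B1 _ hS, ← hLA, List.map_flatMap]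
    apply List.flatMap_congr
    intro k hk
    rw [List.map_map]
    apply List.map_congr_left
    intro o ho
    simp only [Function.comp]
    rw [hcnt k o, hcount2]

-- ===== VERDICT (by name: the statement is the Claim_ definition above) =====
theorem relationship_matrix_table_py_spec : Claim_equal_relationship_matrix_table_py := by
  intro rels _
  unfold Spec_relationship_matrix_table_py
  exact pv_main rels
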